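-- pv_equiv track=rewrite | github.com/sonpham-org/arc-agi-3 | environment_files/px/00000002/px02.py | _can_reach_target
-- ===== SOURCE A (Python) =====
-- def _can_reach_target(current_state, available_keys, transitions, target):
--     """BFS: can we reach target from current_state using available ingredients?"""
--     visited = set()
--     queue = [current_state]
--     visited.add(current_state)
--     while queue:
--         state = queue.pop(0)
--         if state == target:
--             return True
--         for key in available_keys:
--             lookup = (state, key)
--             if lookup in transitions:
--                 next_state = transitions[lookup]
--                 if next_state not in visited:
--                     visited.add(next_state)
--                     queue.append(next_state)
--     return False
-- ===== SOURCE B (Python) =====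
-- def _can_reach_target(current_state, available_keys, transitions, target):
--     """Saturation: grow the reachable set to a fixpoint, then test membership."""
--     reached = {current_state}
--     while True:
--         nxt = set(reached)
--         for s in reached:
--             for k in available_keys:
--                 if (s, k) in transitions:
--                     nxt.add(transitions[(s, k)])
--         if len(nxt) == len(reached):
--             return target in reached
--         reached = nxt
-- ===== Notes on version B (the rewrite author's own statement) =====
-- stated objective: alternative
-- what changed: Replaced the BFS worklist (queue popped from the front, per-state visited bookkeeping) by round-based saturation: repeatedly expand the whole reached set by one transition step until it stops growing, then test target membership.
import Mathlib
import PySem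

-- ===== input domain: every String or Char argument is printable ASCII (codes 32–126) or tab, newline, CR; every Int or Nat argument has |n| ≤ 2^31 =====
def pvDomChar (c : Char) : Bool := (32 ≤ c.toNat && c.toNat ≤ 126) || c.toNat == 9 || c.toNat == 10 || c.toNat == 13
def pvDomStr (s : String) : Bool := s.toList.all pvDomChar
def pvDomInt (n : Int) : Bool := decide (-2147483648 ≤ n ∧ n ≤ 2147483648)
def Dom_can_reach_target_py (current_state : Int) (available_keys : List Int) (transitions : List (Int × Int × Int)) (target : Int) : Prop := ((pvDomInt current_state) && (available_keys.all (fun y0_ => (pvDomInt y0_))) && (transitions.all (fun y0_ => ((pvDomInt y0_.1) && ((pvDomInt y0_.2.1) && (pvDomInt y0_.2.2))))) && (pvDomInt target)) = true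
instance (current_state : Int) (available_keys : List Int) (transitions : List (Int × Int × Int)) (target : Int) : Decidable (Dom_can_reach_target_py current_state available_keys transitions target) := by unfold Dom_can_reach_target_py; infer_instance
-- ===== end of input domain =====

-- B replaces A's BFS worklist by round-based saturation of the reached set to a fixpoint (alternative decomposition, same results).

-- dict lookup transitions[(s, k)] (assoc list, first match); used by both Pythons for '(s,k) in transitions' + 'transitions[(s,k)]'
def pvLookup? (transitions : List (Int × Int × Int)) (s k : Int) : Option Int :=
  (transitions.find? (fun e => e.1 == s && e.2.1 == k)).map (fun e => e.2.2)

-- ===== PORT A =====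
-- inner 'for key in available_keys' loop: threads (visited, queue)
def bfsExpand (transitions : List (Int × Int × Int)) (available_keys : List Int) (state : Int)
    (vq : PySem.Set Int × List Int) : PySem.Set Int × List Int :=
  available_keys.foldl (fun vq key =>
    match pvLookup? transitions state key with
    | some next_state =>
        if PySem.Set.contains vq.1 next_state then vq
        else (PySem.Set.add vq.1 next_state, vq.2 ++ [next_state])
    | none => vq) vq

-- 'while queue:' loop; fuel bounds the iteration count (each push adds a fresh state to visited,
-- so at most transitions.length + 1 iterations happen; fuel is proved never to run out)
def bfsLoop (transitions : List (Int × Int × Int)) (available_keys : List Int) (target : Int) :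
    Nat → PySem.Set Int → List Int → Bool
  | 0, _, _ => false
  | _ + 1, _, [] => false
  | fuel + 1, visited, state :: rest =>
    if state == target then true
    else
      let vq := bfsExpand transitions available_keys state (visited, rest)
      bfsLoop transitions available_keys target fuel vq.1 vq.2

def can_reach_target_py (current_state : Int) (available_keys : List Int) (transitions : List (Int × Int × Int)) (target : Int) : Bool :=
  bfsLoop transitions available_keys target (transitions.length + 2)
    (PySem.Set.add PySem.Set.empty current_state) [current_state]

-- ===== PORT B =====
-- one saturation round: add every one-step successor of every reached state
def satExpand (transitions : List (Int × Int × Int)) (available_keys : List Int)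
    (reached : PySem.Set Int) : PySem.Set Int :=
  reached.foldl (fun nxt s =>
    available_keys.foldl (fun nxt k =>
      match pvLookup? transitions s k with
      | some y => PySem.Set.add nxt y
      | none => nxt) nxt) reached

-- 'while True:' loop; fuel proved sufficient (the set strictly grows each round)
def satLoop (transitions : List (Int × Int × Int)) (available_keys : List Int) (target : Int) :
    Nat → PySem.Set Int → Bool
  | 0, reached => PySem.Set.contains reached target
  | fuel + 1, reached =>
    let nxt := satExpand transitions available_keys reached
    if PySem.Set.len nxt == PySem.Set.len reached then PySem.Set.contains reached target
    else satLoop transitions available_keys target fuel nxt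

def can_reach_target_py_alt (current_state : Int) (available_keys : List Int) (transitions : List (Int × Int × Int)) (target : Int) : Bool :=
  satLoop transitions available_keys target (transitions.length + 1)
    (PySem.Set.add PySem.Set.empty current_state)

-- ===== PRECONDITION & SPEC =====
def Spec_can_reach_target_py (current_state : Int) (available_keys : List Int) (transitions : List (Int × Int × Int)) (target : Int) (out : Bool) : Prop := out = can_reach_target_py_alt current_state available_keys transitions target
instance (current_state : Int) (available_keys : List Int) (transitions : List (Int × Int × Int)) (target : Int) (out : Bool) : Decidable (Spec_can_reach_target_py current_state available_keys transitions target out) := by unfold Spec_can_reach_target_py; infer_instance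

-- ===== CLAIM (what is proved, stated in full; the proofs are below) =====
def Claim_equal_can_reach_target_py : Prop := ∀ (current_state : Int) (available_keys : List Int) (transitions : List (Int × Int × Int)) (target : Int), Dom_can_reach_target_py current_state available_keys transitions target → Spec_can_reach_target_py current_state available_keys transitions target (can_reach_target_py current_state available_keys transitions target)

-- ===== LEMMAS AND PROOFS =====

-- one transition step with an available key
def StepR (transitions : List (Int × Int × Int)) (available_keys : List Int) (s y : Int) : Prop :=
  ∃ k ∈ available_keys, pvLookup? transitions s k = some y

-- path of length n
def ReachN (transitions : List (Int × Int × Int)) (available_keys : List Int) : Nat → Int → Int → Prop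
  | 0, s, t => s = t
  | n + 1, s, t => ∃ y, StepR transitions available_keys s y ∧ ReachN transitions available_keys n y t

def ReachP (transitions : List (Int × Int × Int)) (available_keys : List Int) (s t : Int) : Prop :=
  ∃ n, ReachN transitions available_keys n s t

-- all states a search starting at `current` can ever visit lie in this list
def pvUniv (current : Int) (transitions : List (Int × Int × Int)) : List Int :=
  current :: transitions.map (fun e => e.2.2)

lemma lookup_mem_univ {transitions : List (Int × Int × Int)} {s k y : Int} (current : Int)
    (h : pvLookup? transitions s k = some y) : y ∈ pvUniv current transitions := by
  unfold pvLookup? at h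
  rcases Option.map_eq_some_iff.mp h with ⟨e, he, rfl⟩
  exact List.mem_cons_of_mem _ (List.mem_map.mpr ⟨e, List.mem_of_find?_eq_some he, rfl⟩)

lemma reachN_snoc {transitions : List (Int × Int × Int)} {keys : List Int} :
    ∀ {m : Nat} {s y t : Int}, ReachN transitions keys m s y → StepR transitions keys y t →
      ReachN transitions keys (m + 1) s t := by
  intro m
  induction m with
  | zero =>
    intro s y t h hst
    have hs : s = y := h
    subst hs
    exact ⟨t, hst, rfl⟩
  | succ m ih =>
    intro s y t h hst
    obtain ⟨z, hz, hr⟩ := h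
    exact ⟨z, hz, ih hr hst⟩

lemma bfsExpand_spec (transitions : List (Int × Int × Int)) (state : Int) :
    ∀ (ks : List Int) (v q : List Int), v.Nodup →
    ∃ d, bfsExpand transitions ks state (v, q) = (v ++ d, q ++ d) ∧ (v ++ d).Nodup ∧
      (∀ y ∈ d, ∃ k ∈ ks, pvLookup? transitions state k = some y) ∧
      (∀ k ∈ ks, ∀ y, pvLookup? transitions state k = some y → y ∈ v ++ d) := by
  intro ks
  induction ks with
  | nil =>
    intro v q hnd
    exact ⟨[], by simp [bfsExpand], by simpa using hnd, by simp, by simp⟩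
  | cons k ks ih =>
    intro v q hnd
    have hstep : bfsExpand transitions (k :: ks) state (v, q) =
        bfsExpand transitions ks state
          (match pvLookup? transitions state k with
           | some next_state =>
               if PySem.Set.contains v next_state then (v, q)
               else (PySem.Set.add v next_state, q ++ [next_state])
           | none => (v, q)) := by
      simp only [bfsExpand, List.foldl_cons]
    cases hk : pvLookup? transitions state k with
    | none =>
      obtain ⟨d, heq, hnd', hdstep, hdcl⟩ := ih v q hnd
      refine ⟨d, by rw [hstep]; simp only [hk]; exact heq, hnd', ?_, ?_⟩
      · intro y hy
        obtain ⟨k', hk', hl⟩ := hdstep y hy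
        exact ⟨k', List.mem_cons_of_mem _ hk', hl⟩
      · intro k' hk' y hl
        rcases List.mem_cons.mp hk' with rfl | hk'
        · rw [hk] at hl; cases hl
        · exact hdcl k' hk' y hl
    | some nxt =>
      by_cases hmem : nxt ∈ v
      · have hc : PySem.Set.contains v nxt = true := (PySem.Set.contains_iff _ _).mpr hmem
        obtain ⟨d, heq, hnd', hdstep, hdcl⟩ := ih v q hnd
        refine ⟨d, by rw [hstep]; simp only [hk, hc, if_pos]; exact heq, hnd', ?_, ?_⟩
        · intro y hy
          obtain ⟨k', hk', hl⟩ := hdstep y hy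
          exact ⟨k', List.mem_cons_of_mem _ hk', hl⟩
        · intro k' hk' y hl
          rcases List.mem_cons.mp hk' with rfl | hk'
          · rw [hk] at hl
            cases hl
            exact List.mem_append_left _ hmem
          · exact hdcl k' hk' y hl
      · have hc : PySem.Set.contains v nxt = false := by
          cases hcc : PySem.Set.contains v nxt
          · rfl
          · exact absurd ((PySem.Set.contains_iff _ _).mp hcc) hmem
        have hadd : PySem.Set.add v nxt = v ++ [nxt] := PySem.Set.add_of_not_mem hmem
        have hnd2 : (v ++ [nxt]).Nodup :=
          hnd.append (List.nodup_singleton _)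
            (fun a ha hb => hmem ((List.mem_singleton.mp hb) ▸ ha))
        obtain ⟨d, heq, hnd', hdstep, hdcl⟩ := ih (v ++ [nxt]) (q ++ [nxt]) hnd2
        refine ⟨nxt :: d, ?_, ?_, ?_, ?_⟩
        · rw [hstep]; simp only [hk, hc, if_neg, Bool.false_eq_true, not_false_iff, hadd]
          rw [heq]; simp only [List.append_assoc]; rfl
        · simpa using hnd'
        · intro y hy
          rcases List.mem_cons.mp hy with rfl | hy
          · exact ⟨k, List.mem_cons_self, hk⟩
          · obtain ⟨k', hk', hl⟩ := hdstep y hy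
            exact ⟨k', List.mem_cons_of_mem _ hk', hl⟩
        · intro k' hk' y hl
          rcases List.mem_cons.mp hk' with rfl | hk'
          · rw [hk] at hl
            cases hl
            simp
          · have := hdcl k' hk' y hl
            simpa using this

-- if every fully-processed visited state is closed, any visited state that reaches the target
-- yields a queue state that reaches the target
lemma reach_escape {transitions : List (Int × Int × Int)} {keys : List Int} {target : Int}
    {v q : List Int}
    (hcl : ∀ x ∈ v, x ∉ q → x ≠ target ∧ ∀ y, StepR transitions keys x y → y ∈ v) :
    ∀ n x, x ∈ v → ReachN transitions keys n x target →
      ∃ z ∈ q, ReachP transitions keys z target := by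
  intro n
  induction n with
  | zero =>
    intro x hx hr
    have hxt : x = target := hr
    subst hxt
    by_cases hq : x ∈ q
    · exact ⟨x, hq, 0, show x = x from rfl⟩
    · exact absurd rfl (hcl x hx hq).1
  | succ n ih =>
    intro x hx hr
    by_cases hq : x ∈ q
    · exact ⟨x, hq, n + 1, hr⟩
    · obtain ⟨y, hs, hr'⟩ := hr
      exact ih y ((hcl x hx hq).2 y hs) hr'

lemma bfsLoop_iff (transitions : List (Int × Int × Int)) (keys : List Int) (target current : Int) :
    ∀ (fuel : Nat) (v q : List Int), v.Nodup →
    (∀ x ∈ q, x ∈ v) → (∀ x ∈ v, x ∈ pvUniv current transitions) →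
    (∀ x ∈ v, x ∉ q → x ≠ target ∧ ∀ y, StepR transitions keys x y → y ∈ v) →
    q.length + ((transitions.length + 1) - v.length) ≤ fuel →
    (bfsLoop transitions keys target fuel v q = true ↔
      ∃ s ∈ q, ReachP transitions keys s target) := by
  intro fuel
  induction fuel with
  | zero =>
    intro v q hnd hqv hvu hcl hfuel
    have hq : q = [] := List.eq_nil_of_length_eq_zero (by omega)
    subst hq
    simp [bfsLoop]
  | succ fuel ih =>
    intro v q hnd hqv hvu hcl hfuel
    cases q with
    | nil => simp [bfsLoop]
    | cons state rest =>
      by_cases hst : state = target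
      · subst hst
        simp only [bfsLoop, BEq.rfl, if_true]
        exact ⟨fun _ => ⟨state, List.mem_cons_self, 0, show state = state from rfl⟩,
          fun _ => trivial⟩
      · have hbeq : (state == target) = false := by simp [hst]
        obtain ⟨d, heq, hnd', hdstep, hdcl⟩ := bfsExpand_spec transitions state keys v rest hnd
        have hloop : bfsLoop transitions keys target (fuel + 1) v (state :: rest) =
            bfsLoop transitions keys target fuel (v ++ d) (rest ++ d) := by
          simp only [bfsLoop, hbeq, Bool.false_eq_true, if_false, heq]
        -- new invariants
        have hvu' : ∀ x ∈ v ++ d, x ∈ pvUniv current transitions := by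
          intro x hx
          rcases List.mem_append.mp hx with hx | hx
          · exact hvu x hx
          · obtain ⟨k, _, hl⟩ := hdstep x hx
            exact lookup_mem_univ current hl
        have hqv' : ∀ x ∈ rest ++ d, x ∈ v ++ d := by
          intro x hx
          rcases List.mem_append.mp hx with hx | hx
          · exact List.mem_append_left _ (hqv x (List.mem_cons_of_mem _ hx))
          · exact List.mem_append_right _ hx
        have hcl' : ∀ x ∈ v ++ d, x ∉ rest ++ d →
            x ≠ target ∧ ∀ y, StepR transitions keys x y → y ∈ v ++ d := by
          intro x hx hnx
          rcases List.mem_append.mp hx with hx | hx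
          · by_cases hxs : x = state
            · subst hxs
              exact ⟨hst, fun y ⟨k, hk, hl⟩ => hdcl k hk y hl⟩
            · have hxq : x ∉ state :: rest := by
                intro h
                rcases List.mem_cons.mp h with h | h
                · exact hxs h
                · exact hnx (List.mem_append_left _ h)
              obtain ⟨h1, h2⟩ := hcl x hx hxq
              exact ⟨h1, fun y hy => List.mem_append_left _ (h2 y hy)⟩
          · exact absurd (List.mem_append_right _ hx) hnx
        have hlen : (v ++ d).length ≤ transitions.length + 1 := by
          have hsub : v ++ d ⊆ pvUniv current transitions := hvu'
          have := (hnd'.subperm hsub).length_le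
          simpa [pvUniv] using this
        have hfuel' : (rest ++ d).length + ((transitions.length + 1) - (v ++ d).length) ≤ fuel := by
          simp only [List.length_append] at *
          simp only [List.length_cons] at hfuel
          omega
        rw [hloop, ih (v ++ d) (rest ++ d) hnd' hqv' hvu' hcl' hfuel']
        constructor
        · rintro ⟨s, hs, hr⟩
          rcases List.mem_append.mp hs with hs | hs
          · exact ⟨s, List.mem_cons_of_mem _ hs, hr⟩
          · obtain ⟨n, hn⟩ := hr
            obtain ⟨k, hk, hl⟩ := hdstep s hs
            exact ⟨state, List.mem_cons_self, n + 1, ⟨s, ⟨k, hk, hl⟩, hn⟩⟩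
        · rintro ⟨s, hs, n, hn⟩
          rcases List.mem_cons.mp hs with rfl | hs
          · cases n with
            | zero => exact absurd hn hst
            | succ n =>
              obtain ⟨y, hsy, hr⟩ := hn
              obtain ⟨k, hk, hl⟩ := hsy
              exact reach_escape hcl' n y (hdcl k hk y hl) hr
          · exact ⟨s, List.mem_append_left _ hs, n, hn⟩

lemma satExpand_inner_spec (transitions : List (Int × Int × Int)) (s : Int) :
    ∀ (ks : List Int) (acc : List Int), acc.Nodup →
    ∃ d, ks.foldl (fun nxt k =>
        match pvLookup? transitions s k with
        | some y => PySem.Set.add nxt y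
        | none => nxt) acc = acc ++ d ∧ (acc ++ d).Nodup ∧
      (∀ y ∈ d, ∃ k ∈ ks, pvLookup? transitions s k = some y) ∧
      (∀ k ∈ ks, ∀ y, pvLookup? transitions s k = some y → y ∈ acc ++ d) := by
  intro ks
  induction ks with
  | nil =>
    intro acc hnd
    exact ⟨[], by simp, by simpa using hnd, by simp, by simp⟩
  | cons k ks ih =>
    intro acc hnd
    rw [List.foldl_cons]
    cases hk : pvLookup? transitions s k with
    | none =>
      obtain ⟨d, heq, hnd', hdstep, hdcl⟩ := ih acc hnd
      refine ⟨d, heq, hnd', ?_, ?_⟩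
      · intro y hy
        obtain ⟨k', hk', hl⟩ := hdstep y hy
        exact ⟨k', List.mem_cons_of_mem _ hk', hl⟩
      · intro k' hk' y hl
        rcases List.mem_cons.mp hk' with rfl | hk'
        · rw [hk] at hl; cases hl
        · exact hdcl k' hk' y hl
    | some nxt =>
      by_cases hmem : nxt ∈ acc
      · have hadd : PySem.Set.add acc nxt = acc := PySem.Set.add_of_mem hmem
        obtain ⟨d, heq, hnd', hdstep, hdcl⟩ := ih acc hnd
        refine ⟨d, by simp only [hadd]; exact heq, hnd', ?_, ?_⟩
        · intro y hy
          obtain ⟨k', hk', hl⟩ := hdstep y hy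
          exact ⟨k', List.mem_cons_of_mem _ hk', hl⟩
        · intro k' hk' y hl
          rcases List.mem_cons.mp hk' with rfl | hk'
          · rw [hk] at hl; cases hl; exact List.mem_append_left _ hmem
          · exact hdcl k' hk' y hl
      · have hadd : PySem.Set.add acc nxt = acc ++ [nxt] := PySem.Set.add_of_not_mem hmem
        have hnd2 : (acc ++ [nxt]).Nodup :=
          hnd.append (List.nodup_singleton _)
            (fun a ha hb => hmem ((List.mem_singleton.mp hb) ▸ ha))
        obtain ⟨d, heq, hnd', hdstep, hdcl⟩ := ih (acc ++ [nxt]) hnd2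
        refine ⟨nxt :: d, ?_, by simpa using hnd', ?_, ?_⟩
        · simp only [hadd]; rw [heq]; simp only [List.append_assoc]; rfl
        · intro y hy
          rcases List.mem_cons.mp hy with rfl | hy
          · exact ⟨k, List.mem_cons_self, hk⟩
          · obtain ⟨k', hk', hl⟩ := hdstep y hy
            exact ⟨k', List.mem_cons_of_mem _ hk', hl⟩
        · intro k' hk' y hl
          rcases List.mem_cons.mp hk' with rfl | hk'
          · rw [hk] at hl; cases hl; simp
          · have := hdcl k' hk' y hl
            simpa using this

lemma satExpand_outer_spec (transitions : List (Int × Int × Int)) (keys : List Int) :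
    ∀ (ss acc : List Int), acc.Nodup →
    ∃ d, ss.foldl (fun nxt s =>
        keys.foldl (fun nxt k =>
          match pvLookup? transitions s k with
          | some y => PySem.Set.add nxt y
          | none => nxt) nxt) acc = acc ++ d ∧ (acc ++ d).Nodup ∧
      (∀ y ∈ d, ∃ s ∈ ss, StepR transitions keys s y) ∧
      (∀ s ∈ ss, ∀ y, StepR transitions keys s y → y ∈ acc ++ d) := by
  intro ss
  induction ss with
  | nil =>
    intro acc hnd
    exact ⟨[], by simp, by simpa using hnd, by simp, by simp⟩
  | cons s ss ih =>
    intro acc hnd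
    rw [List.foldl_cons]
    obtain ⟨d1, heq1, hnd1, hd1step, hd1cl⟩ := satExpand_inner_spec transitions s keys acc hnd
    rw [heq1]
    obtain ⟨d2, heq2, hnd2, hd2step, hd2cl⟩ := ih (acc ++ d1) hnd1
    refine ⟨d1 ++ d2, by rw [heq2]; simp, by simpa using hnd2, ?_, ?_⟩
    · intro y hy
      rcases List.mem_append.mp hy with hy | hy
      · obtain ⟨k, hk, hl⟩ := hd1step y hy
        exact ⟨s, List.mem_cons_self, k, hk, hl⟩
      · obtain ⟨s', hs', hstep⟩ := hd2step y hy
        exact ⟨s', List.mem_cons_of_mem _ hs', hstep⟩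
    · intro s' hs' y hstep
      rcases List.mem_cons.mp hs' with rfl | hs'
      · obtain ⟨k, hk, hl⟩ := hstep
        have := hd1cl k hk y hl
        have h2 : y ∈ acc ++ d1 ++ d2 := List.mem_append_left _ this
        simpa using h2
      · have := hd2cl s' hs' y hstep
        simpa using this

lemma closed_reach {transitions : List (Int × Int × Int)} {keys : List Int} {S : List Int}
    (hcl : ∀ s ∈ S, ∀ y, StepR transitions keys s y → y ∈ S) :
    ∀ n x t, x ∈ S → ReachN transitions keys n x t → t ∈ S := by
  intro n
  induction n with
  | zero =>
    intro x t hx hr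
    have : x = t := hr
    subst this; exact hx
  | succ n ih =>
    intro x t hx hr
    obtain ⟨y, hs, hr'⟩ := hr
    exact ih y t (hcl x hx y hs) hr'

lemma satLoop_iff (transitions : List (Int × Int × Int)) (keys : List Int) (target current : Int) :
    ∀ (fuel : Nat) (S : List Int), S.Nodup → current ∈ S →
    (∀ x ∈ S, x ∈ pvUniv current transitions) →
    (∀ x ∈ S, ReachP transitions keys current x) →
    (transitions.length + 1) - S.length < fuel →
    (satLoop transitions keys target fuel S = true ↔ ReachP transitions keys current target) := by
  intro fuel
  induction fuel with
  | zero => intro S _ _ _ _ hfuel; omega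
  | succ fuel ih =>
    intro S hnd hcur hSu hSr hfuel
    obtain ⟨d, heq, hnd', hdstep, hdcl⟩ := satExpand_outer_spec transitions keys S S hnd
    have hsat : satExpand transitions keys S = S ++ d := heq
    cases d with
    | nil =>
      have hlen : (PySem.Set.len (satExpand transitions keys S) == PySem.Set.len S) = true := by
        rw [hsat]; simp [PySem.Set.len]
      have : satLoop transitions keys target (fuel + 1) S = PySem.Set.contains S target := by
        simp only [satLoop, hlen, if_true]
      rw [this]
      constructor
      · intro h
        exact hSr target ((PySem.Set.contains_iff _ _).mp h)
      · rintro ⟨n, hn⟩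
        have hclosed : ∀ s ∈ S, ∀ y, StepR transitions keys s y → y ∈ S := by
          intro s hs y hy
          have := hdcl s hs y hy
          simpa using this
        exact (PySem.Set.contains_iff _ _).mpr (closed_reach hclosed n current target hcur hn)
    | cons d0 ds =>
      have hlen2 : (S ++ d0 :: ds).length ≤ transitions.length + 1 := by
        have hsub : S ++ d0 :: ds ⊆ pvUniv current transitions := by
          intro x hx
          rcases List.mem_append.mp hx with hx | hx
          · exact hSu x hx
          · obtain ⟨s, hs, ⟨k, _, hl⟩⟩ := hdstep x hx
            exact lookup_mem_univ current hl
        have := (hnd'.subperm hsub).length_le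
        simpa [pvUniv] using this
      have hlenne : (PySem.Set.len (S ++ d0 :: ds) == PySem.Set.len S) = false := by
        simp [PySem.Set.len]
        omega
      have hloop : satLoop transitions keys target (fuel + 1) S =
          satLoop transitions keys target fuel (S ++ d0 :: ds) := by
        simp only [satLoop, hsat, hlenne, Bool.false_eq_true, if_false]
      rw [hloop]
      apply ih
      · exact hnd'
      · exact List.mem_append_left _ hcur
      · intro x hx
        rcases List.mem_append.mp hx with hx | hx
        · exact hSu x hx
        · obtain ⟨s, hs, ⟨k, _, hl⟩⟩ := hdstep x hx
          exact lookup_mem_univ current hl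
      · intro x hx
        rcases List.mem_append.mp hx with hx | hx
        · exact hSr x hx
        · obtain ⟨s, hs, hstep⟩ := hdstep x hx
          obtain ⟨n, hn⟩ := hSr s hs
          exact ⟨n + 1, reachN_snoc hn hstep⟩
      · simp only [List.length_append, List.length_cons] at *
        omega

-- ===== VERDICT (by name: the statement is the Claim_ definition above) =====
theorem can_reach_target_py_spec : Claim_equal_can_reach_target_py := by
  intro current keys transitions target _
  unfold Spec_can_reach_target_py can_reach_target_py can_reach_target_py_alt
  have hinit : PySem.Set.add PySem.Set.empty current = [current] := by
    simp [PySem.Set.add_of_not_mem, PySem.Set.empty]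
  rw [hinit]
  have hA := bfsLoop_iff transitions keys target current (transitions.length + 2)
      [current] [current]
      (by simp) (by simp) (by simp [pvUniv]) (by simp) (by simp; omega)
  have hB := satLoop_iff transitions keys target current (transitions.length + 1)
      [current]
      (by simp) (by simp) (by simp [pvUniv]) (by simp [ReachP]; exact ⟨0, rfl⟩) (by simp)
  rw [Bool.eq_iff_iff, hA, hB]
  simp
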